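-- pv_equiv track=rewrite | github.com/ShreyashAgarwal18/OOP-LAB-SE-SEM3 | sparse2.py | fast_transpose
-- ===== SOURCE A (Python) =====
-- def fast_transpose(matrix):
--     rows, cols, count = matrix[0]
--     transpose_matrix = [[cols, rows, count]]
--     freq = [0] * (cols + 1)
--
--     for element in matrix[1:]:
--         freq[element[1] + 1] += 1
--
--     freq[0] = 1
--     for i in range(1, len(freq) - 1):
--         freq[i] += freq[i - 1]
--
--     temp_matrix = [None] * (count + 1)
--     for element in matrix[1:]:
--         temp_matrix[freq[element[1]]] = [element[1], element[0], element[2]]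
--         freq[element[1]] += 1
--
--     transpose_matrix.extend(temp_matrix[1:])
--     return transpose_matrix
-- ===== SOURCE B (Python) =====
-- def fast_transpose(matrix):
--     rows, cols, count = matrix[0]
--     tail = [None] * count
--     pos = 0
--     for c in range(cols):
--         for element in matrix[1:]:
--             if element[1] == c:
--                 tail[pos] = [element[1], element[0], element[2]]
--                 pos += 1
--     return [[cols, rows, count]] + tail
-- ===== Notes on version B (the rewrite author's own statement) =====
-- stated objective: simpler
-- what changed: Replaces the counting-sort machinery (per-column frequency table, prefix-sum offsets, writes at computed per-column positions) by a direct build: walk the target columns in increasing order and, for each, scan the triplets once, placing the swapped triplets sequentially into the count-sized tail.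
import Mathlib
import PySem

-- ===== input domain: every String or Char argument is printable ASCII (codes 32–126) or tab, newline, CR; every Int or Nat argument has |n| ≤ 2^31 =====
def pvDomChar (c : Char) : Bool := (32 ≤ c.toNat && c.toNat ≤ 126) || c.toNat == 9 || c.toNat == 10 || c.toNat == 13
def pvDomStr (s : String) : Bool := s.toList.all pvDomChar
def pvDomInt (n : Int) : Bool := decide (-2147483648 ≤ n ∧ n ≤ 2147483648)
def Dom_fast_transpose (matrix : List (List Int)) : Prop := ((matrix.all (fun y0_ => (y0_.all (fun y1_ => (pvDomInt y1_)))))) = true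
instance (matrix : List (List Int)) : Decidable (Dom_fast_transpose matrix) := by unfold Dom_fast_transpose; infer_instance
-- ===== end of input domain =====

-- B replaces A's counting-sort machinery (frequency table, prefix sums, indexed writes into a
-- preallocated slot array) by a direct per-column scan-and-append build of the same output; objective: simpler.


-- ===== PORT A =====
-- literal transliteration of A; unpacking `rows, cols, count = matrix[0]` and the item reads
-- `element[i]` are ported with pyGetD defaults (Pre_ excludes the raising inputs), item writes with
-- pySetD (Python negative-index semantics), `matrix[1:]` with slice, the two counting loops and the
-- placement loop as foldl over the same state.
def fast_transpose (matrix : List (List Int)) : List (List Int) :=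
  let hdr := matrix.headD []
  let rows := PySem.List.pyGetD hdr 0 0
  let cols := PySem.List.pyGetD hdr 1 0
  let count := PySem.List.pyGetD hdr 2 0
  let tail := PySem.List.slice matrix (some 1) none
  let transpose_matrix : List (List Int) := [[cols, rows, count]]
  let freq : List Int := List.replicate (cols + 1).toNat 0
  let freq := tail.foldl (fun freq element =>
      PySem.List.pySetD freq (PySem.List.pyGetD element 1 0 + 1)
        (PySem.List.pyGetD freq (PySem.List.pyGetD element 1 0 + 1) 0 + 1)) freq
  let freq := PySem.List.pySetD freq 0 1
  let freq := (PySem.List.pyRange 1 ((freq.length : Int) - 1) 1).foldl (fun freq i =>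
      PySem.List.pySetD freq i
        (PySem.List.pyGetD freq i 0 + PySem.List.pyGetD freq (i - 1) 0)) freq
  let temp_matrix : List (Option (List Int)) := List.replicate (count + 1).toNat none
  let st := tail.foldl (fun (st : List (Option (List Int)) × List Int) element =>
      let c := PySem.List.pyGetD element 1 0
      let p := PySem.List.pyGetD st.2 c 0
      (PySem.List.pySetD st.1 p
          (some [c, PySem.List.pyGetD element 0 0, PySem.List.pyGetD element 2 0]),
       PySem.List.pySetD st.2 c (p + 1))) (temp_matrix, freq)
  -- `transpose_matrix.extend(temp_matrix[1:])`: under Pre_ every slot of temp_matrix[1:] is filled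
  transpose_matrix ++ (PySem.List.slice st.1 (some 1) none).map (fun o => o.getD [])

-- ===== PORT B =====
-- literal transliteration of Source B: count-sized None tail, sequential placement position `pos`,
-- per-column scan of matrix[1:]
def fast_transpose_alt (matrix : List (List Int)) : List (List Int) :=
  let hdr := matrix.headD []
  let rows := PySem.List.pyGetD hdr 0 0
  let cols := PySem.List.pyGetD hdr 1 0
  let count := PySem.List.pyGetD hdr 2 0
  let tail0 : List (Option (List Int)) := List.replicate count.toNat none
  let st := (PySem.List.pyRange 0 cols 1).foldl
    (fun (st : List (Option (List Int)) × Int) c =>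
      (PySem.List.slice matrix (some 1) none).foldl
        (fun (st : List (Option (List Int)) × Int) element =>
          if PySem.List.pyGetD element 1 0 == c then
            (PySem.List.pySetD st.1 st.2
                (some [PySem.List.pyGetD element 1 0, PySem.List.pyGetD element 0 0,
                  PySem.List.pyGetD element 2 0]),
             st.2 + 1)
          else st) st) (tail0, (0 : Int))
  -- under Pre_ every slot of tail is filled (Python returns the Nones raw outside Pre_)
  [[cols, rows, count]] ++ st.1.map (fun o => o.getD [])

-- ===== PRECONDITION & SPEC =====
-- Pre_ restricts to well-formed triplet-form sparse matrices: a 3-entry header with cols ≥ 0 and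
-- either no triplet rows with count ≤ 0, or count equal to the number of triplet rows, each row of
-- length ≥ 3 with its column in [0, cols).  Outside this A raises (IndexError/ValueError), returns
-- a list padded with None (not a value of the declared type), or returns a value scrambled by
-- Python's negative-index wraparound.
def Pre_fast_transpose (matrix : List (List Int)) : Prop :=
  matrix ≠ [] ∧
  (matrix.headD []).length = 3 ∧
  0 ≤ PySem.List.pyGetD (matrix.headD []) 1 0 ∧
  ((matrix.tail = [] ∧ PySem.List.pyGetD (matrix.headD []) 2 0 ≤ 0) ∨
   (PySem.List.pyGetD (matrix.headD []) 2 0 = (matrix.length : Int) - 1 ∧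
    ∀ e ∈ matrix.tail, 3 ≤ e.length ∧ 0 ≤ PySem.List.pyGetD e 1 0 ∧
      PySem.List.pyGetD e 1 0 < PySem.List.pyGetD (matrix.headD []) 1 0))
instance (matrix : List (List Int)) : Decidable (Pre_fast_transpose matrix) := by
  unfold Pre_fast_transpose; infer_instance

def pvWitness_fast_transpose : List (List Int) := [[3, 2, 3], [0, 1, 5], [1, 0, 6], [2, 1, 7]]

def Spec_fast_transpose (matrix : List (List Int)) (out : List (List Int)) : Prop := out = fast_transpose_alt matrix
instance (matrix : List (List Int)) (out : List (List Int)) : Decidable (Spec_fast_transpose matrix out) := by unfold Spec_fast_transpose; infer_instance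

-- ===== CLAIM (what is proved, stated in full; the proofs are below) =====
def Claim_equal_fast_transpose : Prop := ∀ (matrix : List (List Int)), Dom_fast_transpose matrix → Pre_fast_transpose matrix → Spec_fast_transpose matrix (fast_transpose matrix)

-- ===== LEMMAS AND PROOFS =====

-- proof-side shorthands for A's triplets: the column key, the swapped triplet, and counters
def colI (e : List Int) : Int := PySem.List.pyGetD e 1 0
def swapL (e : List Int) : List Int :=
  [colI e, PySem.List.pyGetD e 0 0, PySem.List.pyGetD e 2 0]
def cntEq (t : List (List Int)) (c : Int) : Nat := (t.filter (fun e => colI e == c)).length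
def cntLt (t : List (List Int)) (c : Int) : Nat := t.countP (fun e => decide (colI e < c))
-- the slots of A's temp array that belong to target column j, after the triplets p have been placed
def seg (t p : List (List Int)) (j : Nat) : List (Option (List Int)) :=
  (p.filter (fun e => colI e == (j : Int))).map (fun e => some (swapL e)) ++
    List.replicate (cntEq t (j : Int) - cntEq p (j : Int)) none
-- A's temp array after the triplets p (a prefix of t) have been placed
def tempOf (t p : List (List Int)) (C : Nat) : List (Option (List Int)) :=
  none :: (List.range C).flatMap (seg t p)

lemma getD_set' {α : Type} (xs : List α) (n m : Nat) (v d : α) (h : n < xs.length) :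
    (xs.set n v).getD m d = if m = n then v else xs.getD m d := by
  by_cases hm : m = n
  · subst hm; simp [List.getD, List.getElem?_set, h]
  · rw [List.getD, List.getD, List.getElem?_set, if_neg (fun h' => hm h'.symm), if_neg hm]

lemma cntEq_append (p q : List (List Int)) (c : Int) :
    cntEq (p ++ q) c = cntEq p c + cntEq q c := by
  simp [cntEq, List.filter_append]

lemma cntEq_cons (e : List Int) (q : List (List Int)) (c : Int) :
    cntEq (e :: q) c = (if colI e == c then 1 else 0) + cntEq q c := by
  simp only [cntEq, List.filter_cons]
  split <;> simp <;> omega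

lemma cntEq_eq_countP (t : List (List Int)) (c : Int) :
    cntEq t c = t.countP (fun e => colI e == c) := by simp [cntEq, List.countP_eq_length_filter]

lemma cntLt_succ (t : List (List Int)) (c : Int) :
    cntLt t (c + 1) = cntLt t c + cntEq t c := by
  induction t with
  | nil => simp [cntLt, cntEq]
  | cons a t ih =>
      simp only [cntLt, cntEq_eq_countP, List.countP_cons] at ih ⊢
      have hsplit : (if (decide (colI a < c + 1)) = true then 1 else 0)
          = (if (decide (colI a < c)) = true then 1 else 0)
            + (if (colI a == c) = true then 1 else 0) := by
        split_ifs <;> simp_all <;> omega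
      omega

lemma cntLt_zero (t : List (List Int)) (H0 : ∀ x ∈ t, 0 ≤ colI x) : cntLt t 0 = 0 := by
  rw [cntLt, List.countP_eq_zero]
  intro e he
  simp
  exact H0 e he

lemma len_seg (t p q : List (List Int)) (ht : t = p ++ q) (j : Nat) :
    (seg t p j).length = cntEq t (j : Int) := by
  have h : cntEq t (j : Int) = cntEq p (j : Int) + cntEq q (j : Int) := by
    rw [ht, cntEq_append]
  simp only [seg, List.length_append, List.length_map, List.length_replicate]
  show cntEq p (j : Int) + (cntEq t (j : Int) - cntEq p (j : Int)) = cntEq t (j : Int)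
  omega

lemma len_flatMap_seg (t p q : List (List Int)) (ht : t = p ++ q)
    (H0 : ∀ x ∈ t, 0 ≤ colI x) :
    ∀ c : Nat, ((List.range c).flatMap (seg t p)).length = cntLt t (c : Int) := by
  intro c
  induction c with
  | zero => simpa using (cntLt_zero t H0).symm
  | succ c ih =>
      rw [List.range_succ, List.flatMap_append, List.flatMap_singleton, List.length_append,
        ih, len_seg t p q ht c]
      have : ((c : Int) + 1) = ((c + 1 : Nat) : Int) := by push_cast; ring
      rw [← this, cntLt_succ]

lemma seg_of_ne (t p : List (List Int)) (e : List Int) (j : Nat) (hne : colI e ≠ (j : Int)) :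
    seg t (p ++ [e]) j = seg t p j := by
  have hf : (colI e == (j : Int)) = false := by simpa using hne
  simp [seg, cntEq, List.filter_append, List.filter_cons, hf]

-- the central counting-sort step is proved in tempOf_set below
set_option maxHeartbeats 1000000
lemma tempOf_set (t p q : List (List Int)) (e : List Int) (C c : Nat)
    (ht : t = p ++ e :: q) (hce : colI e = (c : Int)) (hcC : c < C)
    (H0 : ∀ x ∈ t, 0 ≤ colI x) :
    (tempOf t p C).set (1 + cntLt t (c : Int) + cntEq p (c : Int)) (some (swapL e))
      = tempOf t (p ++ [e]) C := by
  have hT : (colI e == (c : Int)) = true := by simp [hce]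
  have hsplit : C = (c + 1) + (C - (c + 1)) := by omega
  have hlenF1 : ((List.range c).flatMap (seg t p)).length = cntLt t (c : Int) :=
    len_flatMap_seg t p (e :: q) ht H0 c
  have hcnt : cntEq t (c : Int) = cntEq p (c : Int) + (cntEq q (c : Int) + 1) := by
    rw [ht, cntEq_append, cntEq_cons]
    simp [hT]; omega
  have hcong1 : ∀ j ∈ List.range c, seg t (p ++ [e]) j = seg t p j := by
    intro j hj
    have hj' : j < c := List.mem_range.mp hj
    exact seg_of_ne t p e j (by rw [hce]; exact_mod_cast (show ¬ c = j by omega))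
  have hcong2 : ∀ j ∈ (List.range (C - (c + 1))).map (fun x => (c + 1) + x),
      seg t (p ++ [e]) j = seg t p j := by
    intro j hj
    obtain ⟨x, -, rfl⟩ := List.mem_map.mp hj
    exact seg_of_ne t p e _ (by rw [hce]; exact_mod_cast (show ¬ c = c + 1 + x by omega))
  have hsegp : seg t p c
      = ((p.filter (fun e => colI e == (c : Int))).map (fun e => some (swapL e)))
        ++ (none :: List.replicate (cntEq q (c : Int)) none) := by
    rw [seg]
    congr 1
    rw [hcnt]
    have h2 : cntEq p (c : Int) + (cntEq q (c : Int) + 1) - cntEq p (c : Int)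
        = cntEq q (c : Int) + 1 := by omega
    rw [h2, List.replicate_succ]
  have hsege : seg t (p ++ [e]) c
      = (((p.filter (fun e => colI e == (c : Int))).map (fun e => some (swapL e)))
          ++ [some (swapL e)])
        ++ List.replicate (cntEq q (c : Int)) none := by
    rw [seg]
    congr 1
    · simp [List.filter_append, List.filter_cons, hT]
    · rw [cntEq_append, hcnt]
      have h1 : cntEq [e] (c : Int) = 1 := by simp [cntEq, List.filter_cons, hT]
      rw [h1]
      congr 1
      omega
  have hlmap : ((p.filter (fun e => colI e == (c : Int))).map
      (fun e => some (swapL e))).length = cntEq p (c : Int) := by simp [cntEq]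
  unfold tempOf
  rw [hsplit, List.range_add, List.range_succ]
  simp only [List.flatMap_append, List.flatMap_singleton]
  rw [List.flatMap_congr hcong1, List.flatMap_congr hcong2]
  rw [hsegp, hsege]
  have hpos : 1 + cntLt t (c : Int) + cntEq p (c : Int)
      = (cntLt t (c : Int) + cntEq p (c : Int)) + 1 := by omega
  rw [hpos, List.set_cons_succ]
  simp only [← List.append_assoc]
  rw [List.set_append, if_pos (by
    simp only [List.length_append, hlenF1, hlmap, List.length_cons]
    omega)]
  rw [List.set_append, if_neg (by
    simp only [List.length_append, hlenF1, hlmap]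
    omega)]
  have hz : cntLt t (c : Int) + cntEq p (c : Int)
      - (((List.range c).flatMap (seg t p)) ++
          (p.filter (fun e => colI e == (c : Int))).map (fun e => some (swapL e))).length = 0 := by
    simp only [List.length_append, hlenF1, hlmap]
    omega
  rw [hz]
  simp

-- the first loop of A: freq[col+1] counting
lemma stage1 (C : Nat) :
    ∀ (s : List (List Int)) (freq : List Int),
      freq.length = C + 1 → (∀ e ∈ s, 0 ≤ colI e ∧ colI e < (C : Int)) →
      (s.foldl (fun freq element =>
          PySem.List.pySetD freq (PySem.List.pyGetD element 1 0 + 1)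
            (PySem.List.pyGetD freq (PySem.List.pyGetD element 1 0 + 1) 0 + 1)) freq).length
          = C + 1 ∧
      (s.foldl (fun freq element =>
          PySem.List.pySetD freq (PySem.List.pyGetD element 1 0 + 1)
            (PySem.List.pyGetD freq (PySem.List.pyGetD element 1 0 + 1) 0 + 1)) freq).getD 0 0
          = freq.getD 0 0 ∧
      ∀ j : Nat, j < C →
        (s.foldl (fun freq element =>
            PySem.List.pySetD freq (PySem.List.pyGetD element 1 0 + 1)
              (PySem.List.pyGetD freq (PySem.List.pyGetD element 1 0 + 1) 0 + 1)) freq).getD (j + 1) 0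
          = freq.getD (j + 1) 0 + (cntEq s (j : Int) : Int) := by
  intro s
  induction s with
  | nil => intro freq hlen _; refine ⟨hlen, rfl, ?_⟩; intro j hj; simp [cntEq]
  | cons e s ih =>
      intro freq hlen hc
      obtain ⟨h0, hC⟩ := hc e (by simp)
      have hcs : ∀ x ∈ s, 0 ≤ colI x ∧ colI x < (C : Int) := fun x hx => hc x (by simp [hx])
      set cN := (colI e).toNat with hcN
      have hcast : colI e = (cN : Int) := (Int.toNat_of_nonneg h0).symm
      have hcNC : cN < C := by omega
      have hidx : (colI e + 1).toNat = cN + 1 := by omega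
      have hset : PySem.List.pySetD freq (PySem.List.pyGetD e 1 0 + 1)
            (PySem.List.pyGetD freq (PySem.List.pyGetD e 1 0 + 1) 0 + 1)
          = freq.set (cN + 1) (freq.getD (cN + 1) 0 + 1) := by
        show PySem.List.pySetD freq (colI e + 1) (PySem.List.pyGetD freq (colI e + 1) 0 + 1)
            = freq.set (cN + 1) (freq.getD (cN + 1) 0 + 1)
        rw [PySem.List.pySetD_of_nonneg _ _ (by omega),
          PySem.List.pyGetD_eq_getElem _ _ (by omega) (by rw [hlen]; push_cast; omega),
          List.getD_eq_getElem _ _ (show cN + 1 < freq.length by omega)]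
        simp only [hidx]
      rw [List.foldl_cons, hset]
      have hlen' : (freq.set (cN + 1) (freq.getD (cN + 1) 0 + 1)).length = C + 1 := by
        simp [hlen]
      obtain ⟨ih1, ih2, ih3⟩ := ih (freq.set (cN + 1) (freq.getD (cN + 1) 0 + 1)) hlen' hcs
      refine ⟨ih1, ?_, ?_⟩
      · rw [ih2, getD_set' _ _ _ _ _ (by omega)]
        simp
      · intro j hj
        rw [ih3 j hj, getD_set' _ _ _ _ _ (by omega)]
        rw [cntEq_cons]
        by_cases hjc : j = cN
        · have hb : (colI e == (j : Int)) = true := by simp [hcast, hjc]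
          rw [hb, if_pos (by omega : j + 1 = cN + 1)]
          simp [hjc]
          ring
        · have hne : (colI e == (j : Int)) = false := by
            simp only [hcast, beq_eq_false_iff_ne, ne_eq, Int.natCast_inj]
            omega
          rw [hne, if_neg (by omega : ¬ (j + 1 = cN + 1))]
          push_cast
          ring

-- the prefix-sum loop of A
lemma stage3_aux (C : Nat) (t : List (List Int)) :
    ∀ (len a : Nat) (freq : List Int), 1 ≤ a → a + len ≤ C →
      freq.length = C + 1 →
      (∀ j : Nat, j < a → freq.getD j 0 = 1 + (cntLt t (j : Int) : Int)) →
      (∀ j : Nat, a ≤ j + 1 → j + 1 ≤ C → freq.getD (j + 1) 0 = (cntEq t (j : Int) : Int)) →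
      ((PySem.List.pyRange (a : Int) ((a : Int) + (len : Int)) 1).foldl (fun freq i =>
          PySem.List.pySetD freq i
            (PySem.List.pyGetD freq i 0 + PySem.List.pyGetD freq (i - 1) 0)) freq).length = C + 1 ∧
      ∀ j : Nat, j < a + len →
        ((PySem.List.pyRange (a : Int) ((a : Int) + (len : Int)) 1).foldl (fun freq i =>
            PySem.List.pySetD freq i
              (PySem.List.pyGetD freq i 0 + PySem.List.pyGetD freq (i - 1) 0)) freq).getD j 0
          = 1 + (cntLt t (j : Int) : Int) := by
  intro len
  induction len with
  | zero =>
      intro a freq ha haC hlen hoff hraw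
      rw [show ((a : Int) + (0 : Nat) : Int) = (a : Int) by push_cast; ring,
        PySem.List.pyRange_one_eq_nil (le_refl _)]
      exact ⟨hlen, fun j hj => hoff j (by omega)⟩
  | succ len ih =>
      intro a freq ha haC hlen hoff hraw
      rw [PySem.List.pyRange_one_cons (by push_cast; omega), List.foldl_cons]
      have hread1 : PySem.List.pyGetD freq (a : Int) 0 = (cntEq t ((a - 1 : Nat) : Int) : Int) := by
        rw [PySem.List.pyGetD_eq_getElem _ _ (by omega) (by rw [hlen]; push_cast; omega)]
        rw [← List.getD_eq_getElem _ (0 : Int) (by simp [hlen]; omega)]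
        simp only [Int.toNat_natCast]
        have := hraw (a - 1) (by omega) (by omega)
        rwa [show a - 1 + 1 = a by omega] at this
      have hread2 : PySem.List.pyGetD freq ((a : Int) - 1) 0
          = 1 + (cntLt t ((a - 1 : Nat) : Int) : Int) := by
        rw [show ((a : Int) - 1) = ((a - 1 : Nat) : Int) by push_cast [Nat.cast_sub ha]; ring]
        rw [PySem.List.pyGetD_eq_getElem _ _ (by omega) (by rw [hlen]; push_cast; omega)]
        rw [← List.getD_eq_getElem _ (0 : Int) (by simp [hlen]; omega)]
        simp only [Int.toNat_natCast]
        exact hoff (a - 1) (by omega)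
      have hval : (cntEq t ((a - 1 : Nat) : Int) : Int) + (1 + (cntLt t ((a - 1 : Nat) : Int) : Int))
          = 1 + (cntLt t (a : Int) : Int) := by
        have : ((a - 1 : Nat) : Int) + 1 = (a : Int) := by push_cast [Nat.cast_sub ha]; ring
        rw [← this, cntLt_succ]
        push_cast
        ring
      have hset : PySem.List.pySetD freq (a : Int)
            (PySem.List.pyGetD freq (a : Int) 0 + PySem.List.pyGetD freq ((a : Int) - 1) 0)
          = freq.set a (1 + (cntLt t (a : Int) : Int)) := by
        rw [hread1, hread2, hval, PySem.List.pySetD_of_nonneg _ _ (by omega)]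
        simp
      rw [hset]
      have hres := ih (a + 1) (freq.set a (1 + (cntLt t (a : Int) : Int))) (by omega) (by omega)
        (by simp [hlen])
        (by
          intro j hj
          rw [getD_set' _ _ _ _ _ (by omega)]
          by_cases hja : j = a
          · subst hja; simp
          · rw [if_neg hja]; exact hoff j (by omega))
        (by
          intro j h1 h2
          rw [getD_set' _ _ _ _ _ (by omega), if_neg (by omega)]
          exact hraw j (by omega) h2)
      rw [show ((a : Int) + 1) = ((a + 1 : Nat) : Int) by push_cast; ring,
        show ((a : Int) + ((len : Nat) + 1 : Nat) : Int) = (((a + 1 : Nat) : Int) + (len : Int)) by push_cast; ring] at *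
      exact ⟨hres.1, fun j hj => hres.2 j (by omega)⟩

-- the placement loop of A: starting from offsets, it fills temp to the fully grouped array
lemma main_loop (C : Nat) (t : List (List Int))
    (Hc : ∀ e ∈ t, 0 ≤ colI e ∧ colI e < (C : Int)) :
    ∀ (q p : List (List Int)) (freq : List Int), t = p ++ q → freq.length = C + 1 →
      (∀ j : Nat, j < C →
        freq.getD j 0 = 1 + (cntLt t (j : Int) : Int) + (cntEq p (j : Int) : Int)) →
      (q.foldl (fun (st : List (Option (List Int)) × List Int) element =>
          (PySem.List.pySetD st.1 (PySem.List.pyGetD st.2 (PySem.List.pyGetD element 1 0) 0)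
              (some [PySem.List.pyGetD element 1 0, PySem.List.pyGetD element 0 0,
                PySem.List.pyGetD element 2 0]),
           PySem.List.pySetD st.2 (PySem.List.pyGetD element 1 0)
              (PySem.List.pyGetD st.2 (PySem.List.pyGetD element 1 0) 0 + 1)))
        (tempOf t p C, freq)).1 = tempOf t t C := by
  intro q
  induction q with
  | nil => intro p freq ht _ _; rw [List.foldl_nil]; rw [← List.append_nil p, ← ht]
  | cons e q ih =>
      intro p freq ht hlen hfreq
      obtain ⟨h0, hC⟩ := Hc e (by rw [ht]; simp)
      set cN := (colI e).toNat with hcN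
      have hcast : colI e = (cN : Int) := (Int.toNat_of_nonneg h0).symm
      have hcNC : cN < C := by omega
      have hread : PySem.List.pyGetD freq (PySem.List.pyGetD e 1 0) 0
          = 1 + (cntLt t (cN : Int) : Int) + (cntEq p (cN : Int) : Int) := by
        show PySem.List.pyGetD freq (colI e) 0 = _
        rw [hcast, PySem.List.pyGetD_eq_getElem _ _ (by omega) (by rw [hlen]; push_cast; omega)]
        rw [← List.getD_eq_getElem _ (0 : Int) (by simp [hlen]; omega)]
        simp only [Int.toNat_natCast]
        exact hfreq cN hcNC
      have hsetT : PySem.List.pySetD (tempOf t p C)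
            (PySem.List.pyGetD freq (PySem.List.pyGetD e 1 0) 0)
            (some [PySem.List.pyGetD e 1 0, PySem.List.pyGetD e 0 0, PySem.List.pyGetD e 2 0])
          = tempOf t (p ++ [e]) C := by
        rw [hread, PySem.List.pySetD_of_nonneg _ _ (by positivity)]
        have hnat : (1 + (cntLt t (cN : Int) : Int) + (cntEq p (cN : Int) : Int)).toNat
            = 1 + cntLt t (cN : Int) + cntEq p (cN : Int) := by omega
        rw [hnat]
        exact tempOf_set t p q e C cN ht hcast hcNC (fun x hx => (Hc x hx).1)
      have hsetF : PySem.List.pySetD freq (PySem.List.pyGetD e 1 0)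
            (PySem.List.pyGetD freq (PySem.List.pyGetD e 1 0) 0 + 1)
          = freq.set cN (1 + (cntLt t (cN : Int) : Int) + (cntEq p (cN : Int) : Int) + 1) := by
        rw [hread]
        show PySem.List.pySetD freq (colI e) _ = _
        rw [hcast, PySem.List.pySetD_of_nonneg _ _ (by omega)]
        simp
      rw [List.foldl_cons]
      show ((q.foldl _ (PySem.List.pySetD (tempOf t p C) _ _, PySem.List.pySetD freq _ _))).1 = _
      rw [hsetT, hsetF]
      refine ih (p ++ [e]) _ (by simp [ht]) (by simp [hlen]) ?_
      intro j hj
      rw [getD_set' _ _ _ _ _ (by omega)]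
      by_cases hjc : j = cN
      · subst hjc
        rw [if_pos rfl, cntEq_append]
        have h1 : cntEq [e] (cN : Int) = 1 := by
          simp [cntEq, List.filter_cons, hcast]
        rw [h1]
        push_cast
        ring
      · rw [if_neg hjc, hfreq j hj, cntEq_append]
        have h1 : cntEq [e] ((j : Nat) : Int) = 0 := by
          have hb0 : (colI e == (j : Int)) = false := by
            simp only [hcast, beq_eq_false_iff_ne, ne_eq, Int.natCast_inj]
            omega
          simp [cntEq, List.filter_cons, hb0]
        rw [h1]
        push_cast
        ring

-- the fresh temp array is the grouped array with nothing placed yet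
lemma replicate_eq_tempOf (t : List (List Int)) (C : Nat)
    (Hc : ∀ e ∈ t, 0 ≤ colI e ∧ colI e < (C : Int)) :
    List.replicate (t.length + 1) (none : Option (List Int)) = tempOf t [] C := by
  symm
  rw [List.eq_replicate_iff]
  constructor
  · have hlen := len_flatMap_seg t [] t (by simp) (fun x hx => (Hc x hx).1) C
    have hC : cntLt t (C : Int) = t.length := by
      rw [cntLt, List.countP_eq_length]
      intro e he
      simp
      exact (Hc e he).2
    simp [tempOf, hlen, hC]
  · intro b hb
    rcases List.mem_cons.mp hb with rfl | hb
    · rfl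
    · obtain ⟨j, hj, hbj⟩ := List.mem_flatMap.mp hb
      have hseg : seg t [] j = List.replicate (cntEq t (j : Int)) none := by
        simp [seg, cntEq]
      rw [hseg] at hbj
      exact List.eq_of_mem_replicate hbj

-- the prefix-sum loop, packaged for its use site (whole range 1..C-1, starting from raw counts)
lemma stage3_all (C : Nat) (t : List (List Int)) (H0 : ∀ x ∈ t, 0 ≤ colI x)
    (freq : List Int) (hlen : freq.length = C + 1) (h0 : freq.getD 0 0 = 1)
    (hraw : ∀ j : Nat, j + 1 ≤ C → freq.getD (j + 1) 0 = (cntEq t (j : Int) : Int)) :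
    ((PySem.List.pyRange 1 (C : Int) 1).foldl (fun freq i =>
        PySem.List.pySetD freq i
          (PySem.List.pyGetD freq i 0 + PySem.List.pyGetD freq (i - 1) 0)) freq).length = C + 1 ∧
    ∀ j : Nat, j < C →
      ((PySem.List.pyRange 1 (C : Int) 1).foldl (fun freq i =>
          PySem.List.pySetD freq i
            (PySem.List.pyGetD freq i 0 + PySem.List.pyGetD freq (i - 1) 0)) freq).getD j 0
        = 1 + (cntLt t (j : Int) : Int) := by
  cases C with
  | zero =>
      rw [PySem.List.pyRange_one_eq_nil (by omega), List.foldl_nil]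
      exact ⟨hlen, fun j hj => absurd hj (by omega)⟩
  | succ C' =>
      have haux := stage3_aux (C' + 1) t C' 1 freq (le_refl 1) (by omega) hlen
        (by
          intro j hj
          have hj0 : j = 0 := by omega
          subst hj0
          rw [h0]
          simp [cntLt_zero t H0])
        (fun j _ h2 => hraw j h2)
      rw [show (((1 : Nat) : Int)) = (1 : Int) by norm_num,
        show ((1 : Int) + ((C' : Nat) : Int)) = (((C' + 1 : Nat) : Int)) by push_cast; ring] at haux
      exact ⟨haux.1, fun j hj => haux.2 j (by omega)⟩

lemma foldl_const {α β : Type} (l : List α) (acc : β) :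
    l.foldl (fun acc _ => acc) acc = acc := by
  induction l generalizing acc with
  | nil => rfl
  | cons a l ih => simp [List.foldl_cons, ih]

-- A's whole pipeline after the counting loop, stated against abstract counting results freq1
lemma A_tail_eq (C : Nat) (t : List (List Int))
    (Hc : ∀ e ∈ t, 0 ≤ colI e ∧ colI e < (C : Int)) (freq1 : List Int)
    (h1len : freq1.length = C + 1)
    (h1succ : ∀ j : Nat, j + 1 ≤ C → freq1.getD (j + 1) 0 = (cntEq t (j : Int) : Int)) :
    (List.foldl (fun (st : List (Option (List Int)) × List Int) element =>
        (PySem.List.pySetD st.1 (PySem.List.pyGetD st.2 (PySem.List.pyGetD element 1 0) 0)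
            (some [PySem.List.pyGetD element 1 0, PySem.List.pyGetD element 0 0,
              PySem.List.pyGetD element 2 0]),
         PySem.List.pySetD st.2 (PySem.List.pyGetD element 1 0)
            (PySem.List.pyGetD st.2 (PySem.List.pyGetD element 1 0) 0 + 1)))
      (tempOf t [] C,
        List.foldl (fun freq i =>
            PySem.List.pySetD freq i
              (PySem.List.pyGetD freq i 0 + PySem.List.pyGetD freq (i - 1) 0))
          (PySem.List.pySetD freq1 0 1)
          (PySem.List.pyRange 1 (((PySem.List.pySetD freq1 0 1).length : Int) - 1))) t).1
    = tempOf t t C := by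
  have H0 : ∀ x ∈ t, 0 ≤ colI x := fun x hx => (Hc x hx).1
  have hset2 : PySem.List.pySetD freq1 0 1 = freq1.set 0 1 := by
    rw [PySem.List.pySetD_of_nonneg _ _ (le_refl 0)]
    norm_num
  have h2len : (PySem.List.pySetD freq1 0 1).length = C + 1 := by
    rw [hset2]; simpa using h1len
  have h2zero : (PySem.List.pySetD freq1 0 1).getD 0 0 = 1 := by
    rw [hset2, getD_set' _ _ _ _ _ (by omega)]
    simp
  have h2succ : ∀ j : Nat, j + 1 ≤ C → (PySem.List.pySetD freq1 0 1).getD (j + 1) 0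
      = (cntEq t (j : Int) : Int) := by
    intro j hj
    rw [hset2, getD_set' _ _ _ _ _ (by omega), if_neg (by omega)]
    exact h1succ j hj
  rw [show (((PySem.List.pySetD freq1 0 1).length : Int) - 1) = (C : Int) by
    rw [h2len]; push_cast; ring]
  obtain ⟨s3len, s3off⟩ := stage3_all C t H0 (PySem.List.pySetD freq1 0 1) h2len h2zero h2succ
  refine main_loop C t Hc t [] _ rfl s3len ?_
  intro j hj
  rw [s3off j hj]
  simp [cntEq]

lemma B_inner (n : Nat) (c : Int) :
    ∀ (s G : List (List Int)),
      G.length + (s.filter (fun e => colI e == c)).length ≤ n →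
      s.foldl (fun (st : List (Option (List Int)) × Int) element =>
          if PySem.List.pyGetD element 1 0 == c then
            (PySem.List.pySetD st.1 st.2
                (some [PySem.List.pyGetD element 1 0, PySem.List.pyGetD element 0 0,
                  PySem.List.pyGetD element 2 0]),
             st.2 + 1)
          else st)
        (G.map some ++ List.replicate (n - G.length) none, (G.length : Int))
      = ((G ++ (s.filter (fun e => colI e == c)).map swapL).map some
          ++ List.replicate (n - (G ++ (s.filter (fun e => colI e == c)).map swapL).length) none,
         ((G ++ (s.filter (fun e => colI e == c)).map swapL).length : Int)) := by
  intro s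
  induction s with
  | nil => intro G hle; simp
  | cons e s ih =>
      intro G hle
      rw [List.foldl_cons]
      by_cases hm : (colI e == c) = true
      · have hfe : (e :: s).filter (fun e => colI e == c)
            = e :: s.filter (fun e => colI e == c) := by
          simp [List.filter_cons, hm]
        rw [hfe] at hle ⊢
        have hlt : G.length < n := by simp at hle; omega
        have hstep : (if PySem.List.pyGetD e 1 0 == c then
              (PySem.List.pySetD (G.map some ++ List.replicate (n - G.length) none)
                  ((G.length : Nat) : Int)
                  (some [PySem.List.pyGetD e 1 0, PySem.List.pyGetD e 0 0,
                    PySem.List.pyGetD e 2 0]),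
               ((G.length : Nat) : Int) + 1)
            else (G.map some ++ List.replicate (n - G.length) none, ((G.length : Nat) : Int)))
            = ((G ++ [swapL e]).map some
                ++ List.replicate (n - (G ++ [swapL e]).length) none,
               (((G ++ [swapL e]).length : Nat) : Int)) := by
          rw [if_pos (show (PySem.List.pyGetD e 1 0 == c) = true from hm)]
          refine Prod.ext ?_ (by push_cast [List.length_append]; simp)
          show PySem.List.pySetD _ _ _ = _
          rw [PySem.List.pySetD_of_nonneg _ _ (Int.natCast_nonneg _), Int.toNat_natCast,
            List.set_append, if_neg (by simp)]
          rw [show n - G.length = (n - (G.length + 1)) + 1 by omega, List.replicate_succ]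
          simp [swapL, colI, List.append_assoc]
        rw [hstep]
        rw [ih (G ++ [swapL e]) (by simp at hle ⊢; omega)]
        simp [List.append_assoc]
      · have hfe : (e :: s).filter (fun e => colI e == c)
            = s.filter (fun e => colI e == c) := by
          simp [List.filter_cons, hm]
        rw [hfe] at hle ⊢
        have hstep : (if PySem.List.pyGetD e 1 0 == c then
              (PySem.List.pySetD (G.map some ++ List.replicate (n - G.length) none)
                  ((G.length : Nat) : Int)
                  (some [PySem.List.pyGetD e 1 0, PySem.List.pyGetD e 0 0,
                    PySem.List.pyGetD e 2 0]),
               ((G.length : Nat) : Int) + 1)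
            else (G.map some ++ List.replicate (n - G.length) none, ((G.length : Nat) : Int)))
            = (G.map some ++ List.replicate (n - G.length) none, ((G.length : Nat) : Int)) := by
          rw [if_neg (by exact fun hh => hm hh)]
        rw [hstep]
        exact ih G hle

lemma len_G (t : List (List Int)) (H0 : ∀ x ∈ t, 0 ≤ colI x) :
    ∀ c : Nat, ((List.range c).flatMap (fun (j : Nat) =>
        (t.filter (fun e => colI e == (j : Int))).map swapL)).length = cntLt t (c : Int) := by
  intro c
  induction c with
  | zero => simpa using (cntLt_zero t H0).symm
  | succ c ih =>
      rw [List.range_succ, List.flatMap_append, List.flatMap_singleton, List.length_append, ih]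
      have h1 : ((t.filter (fun e => colI e == (c : Int))).map swapL).length
          = cntEq t (c : Int) := by simp [cntEq]
      rw [h1]
      have : ((c : Int) + 1) = ((c + 1 : Nat) : Int) := by push_cast; ring
      rw [← this, cntLt_succ]

lemma B_outer (t : List (List Int)) (C : Nat)
    (Hc : ∀ e ∈ t, 0 ≤ colI e ∧ colI e < (C : Int)) :
    ∀ (len a : Nat) (G : List (List Int)), a + len = C →
      G = (List.range a).flatMap (fun (j : Nat) =>
          (t.filter (fun e => colI e == (j : Int))).map swapL) →
      (PySem.List.pyRange ((a : Nat) : Int) (((a : Nat) : Int) + ((len : Nat) : Int)) 1).foldl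
          (fun (st : List (Option (List Int)) × Int) c =>
            t.foldl (fun (st : List (Option (List Int)) × Int) element =>
                if PySem.List.pyGetD element 1 0 == c then
                  (PySem.List.pySetD st.1 st.2
                      (some [PySem.List.pyGetD element 1 0, PySem.List.pyGetD element 0 0,
                        PySem.List.pyGetD element 2 0]),
                   st.2 + 1)
                else st) st)
          (G.map some ++ List.replicate (t.length - G.length) none, (G.length : Int))
        = (((List.range C).flatMap (fun (j : Nat) =>
              (t.filter (fun e => colI e == (j : Int))).map swapL)).map some
            ++ List.replicate (t.length - ((List.range C).flatMap (fun (j : Nat) =>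
              (t.filter (fun e => colI e == (j : Int))).map swapL)).length) none,
           (((List.range C).flatMap (fun (j : Nat) =>
              (t.filter (fun e => colI e == (j : Int))).map swapL)).length : Int)) := by
  have H0 : ∀ x ∈ t, 0 ≤ colI x := fun x hx => (Hc x hx).1
  intro len
  induction len with
  | zero =>
      intro a G ha hG
      rw [show (((a : Nat) : Int) + ((0 : Nat) : Int)) = ((a : Nat) : Int) by push_cast; ring,
        PySem.List.pyRange_one_eq_nil (le_refl _), List.foldl_nil]
      subst hG
      rw [show a = C from by omega]
  | succ len ih =>
      intro a G ha hG
      rw [PySem.List.pyRange_one_cons (by push_cast; omega), List.foldl_cons]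
      have hbound : G.length + (t.filter (fun e => colI e == (a : Int))).length ≤ t.length := by
        rw [hG, len_G t H0 a]
        have h1 : (t.filter (fun e => colI e == (a : Int))).length = cntEq t (a : Int) := by
          simp [cntEq]
        rw [h1, ← cntLt_succ]
        exact List.countP_le_length
      rw [B_inner t.length ((a : Nat) : Int) t G hbound]
      have hG' : G ++ (t.filter (fun e => colI e == (a : Int))).map swapL
          = (List.range (a + 1)).flatMap (fun (j : Nat) =>
              (t.filter (fun e => colI e == (j : Int))).map swapL) := by
        rw [List.range_succ, List.flatMap_append, List.flatMap_singleton, hG]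
      rw [hG']
      have hcast1 : ((a : Nat) : Int) + 1 = (((a + 1 : Nat) : Nat) : Int) := by push_cast; ring
      have hcast2 : ((a : Nat) : Int) + (((len + 1 : Nat) : Nat) : Int)
          = (((a + 1 : Nat) : Nat) : Int) + ((len : Nat) : Int) := by push_cast; ring
      rw [hcast1, hcast2]
      exact ih (a + 1) _ (by omega) rfl

-- ===== VERDICT (by name: the statement is the Claim_ definition above) =====
theorem fast_transpose_spec : Claim_equal_fast_transpose := by
  intro matrix _hdom hpre
  unfold Spec_fast_transpose
  obtain ⟨hne, hlen3, hc0, hrest⟩ := hpre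
  cases matrix with
  | nil => exact absurd rfl hne
  | cons h t =>
  simp only [List.headD_cons, List.tail_cons] at hlen3 hc0 hrest
  rcases hrest with ⟨htnil, hcle⟩ | ⟨hcnt, htail⟩
  · -- no triplet rows and count ≤ 0: both sides return just the header
    subst htnil
    unfold fast_transpose fast_transpose_alt
    dsimp only
    simp only [List.headD_cons, PySem.List.slice_from_one, List.tail_cons, List.foldl_nil]
    rw [List.tail_replicate, List.map_replicate,
      show (PySem.List.pyGetD h 2 0 + 1).toNat - 1 = 0 by omega,
      List.replicate_zero, List.append_nil, foldl_const,
      show (PySem.List.pyGetD h 2 0).toNat = 0 by omega]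
    simp
  set C : Nat := (PySem.List.pyGetD h 1 0).toNat with hCdef
  have hC : ((C : Nat) : Int) = PySem.List.pyGetD h 1 0 := Int.toNat_of_nonneg hc0
  have Hc : ∀ e ∈ t, 0 ≤ colI e ∧ colI e < (C : Int) := by
    intro e he; rw [hC]; exact ⟨(htail e he).2.1, (htail e he).2.2⟩
  have H0 : ∀ x ∈ t, 0 ≤ colI x := fun x hx => (Hc x hx).1
  have hcount : PySem.List.pyGetD h 2 0 = (t.length : Int) := by
    rw [hcnt]; simp
  unfold fast_transpose fast_transpose_alt
  dsimp only
  simp only [List.headD_cons, PySem.List.slice_from_one, List.tail_cons]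
  rw [show (PySem.List.pyGetD h 1 0 + 1).toNat = C + 1 by omega]
  rw [show (PySem.List.pyGetD h 2 0 + 1).toNat = t.length + 1 by rw [hcount]; omega]
  rw [replicate_eq_tempOf t C Hc]
  obtain ⟨s1len, -, s1succ⟩ := stage1 C t (List.replicate (C + 1) (0 : Int)) (by simp) Hc
  rw [A_tail_eq C t Hc _ s1len
    (by
      intro j hj
      rw [s1succ j (by omega)]
      simp)]
  -- A's tail is the column-grouped list of swapped triplets
  have hA : List.map (fun o => o.getD []) (tempOf t t C).tail
      = (List.range C).flatMap (fun (j : Nat) =>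
          (t.filter (fun e => colI e == (j : Int))).map swapL) := by
    show List.map (fun o => o.getD []) ((List.range C).flatMap (seg t t)) = _
    rw [List.map_flatMap]
    refine List.flatMap_congr ?_
    intro j hj
    simp [seg, cntEq, List.map_map, Function.comp_def]
  rw [hA]
  -- B's sequential placement builds the same grouped list
  rw [show (PySem.List.pyGetD h 2 0).toNat = t.length by rw [hcount]; omega, ← hC]
  have hB := B_outer t C Hc C 0 [] (by omega) rfl
  simp only [List.map_nil, List.nil_append, List.length_nil, Nat.sub_zero,
    CharP.cast_eq_zero, zero_add] at hB
  rw [hB]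
  have hlenFULL : ((List.range C).flatMap (fun (j : Nat) =>
      (t.filter (fun e => colI e == (j : Int))).map swapL)).length = t.length := by
    rw [len_G t H0 C, cntLt, List.countP_eq_length]
    intro e he
    simp
    exact (Hc e he).2
  rw [hlenFULL]
  simp [List.map_map, Function.comp_def]
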